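-- pv_equiv track=rewrite | github.com/SrijaAdhya12/python-programs | accenture/farmer_land.py | find_land
-- ===== SOURCE A (Python) =====
-- def find_land(n):
--     land = []
--     sum = 0
--     if n ==1:
--         return 1
--     for i in range(1,n+1):
--         land.append(i)
--
--     for j in range(1,len(land)):
--         sum += land[j-1] ^ land[j]
--     return sum
-- ===== SOURCE B (Python) =====
-- def find_land(n):
--     # O(log n) closed form: sum_{j=1}^{n-1} (j ^ (j+1)) = (sum_b 2^b * (n >> b)) - 1 for n >= 2
--     if n == 1:
--         return 1
--     if n < 2:
--         return 0
--     def f(m):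
--         return 0 if m == 0 else m + 2 * f(m // 2)
--     return f(n) - 1
-- ===== Notes on version B (the rewrite author's own statement) =====
-- stated objective: faster
-- what changed: Replaces A's O(n) build-and-scan of the list [1..n] with an O(log n) closed form: sum of consecutive XORs of 1..n equals (sum_b 2^b * (n >> b)) - 1, computed by a logarithmic recursion f(m) = m + 2*f(m//2).
import Mathlib
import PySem

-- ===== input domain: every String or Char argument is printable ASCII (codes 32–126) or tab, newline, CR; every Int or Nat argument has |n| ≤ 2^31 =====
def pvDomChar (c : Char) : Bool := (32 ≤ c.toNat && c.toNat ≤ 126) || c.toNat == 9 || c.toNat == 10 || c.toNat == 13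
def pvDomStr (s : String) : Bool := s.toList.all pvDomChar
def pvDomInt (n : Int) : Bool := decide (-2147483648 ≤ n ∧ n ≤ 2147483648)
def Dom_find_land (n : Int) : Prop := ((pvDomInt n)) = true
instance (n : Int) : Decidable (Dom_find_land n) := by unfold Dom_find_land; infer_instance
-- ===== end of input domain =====

-- B replaces A's O(n) scan of [1..n] by the O(log n) closed form sum_b 2^b*(n>>b) - 1.

-- ===== PORT A =====
def find_land (n : Int) : Int :=
  if n = 1 then 1
  else
    -- land = []; for i in range(1, n+1): land.append(i)
    let land : List Int := (PySem.List.pyRange 1 (n+1) 1).foldl (fun acc i => acc ++ [i]) []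
    -- for j in range(1, len(land)): sum += land[j-1] ^ land[j]
    (PySem.List.pyRange 1 (land.length : Int) 1).foldl
      (fun s j => s + PySem.Int.bxor (PySem.List.pyGetD land (j-1) 0) (PySem.List.pyGetD land j 0)) 0

-- ===== PORT B =====
-- f(m) = 0 if m == 0 else m + 2*f(m//2)   (Source B's inner helper; called only with m ≥ 0)
def find_land_alt_f (m : Nat) : Int :=
  if m = 0 then 0 else (m : Int) + 2 * find_land_alt_f (m / 2)
decreasing_by exact Nat.div_lt_self (Nat.pos_of_ne_zero (by assumption)) (by norm_num)

def find_land_alt (n : Int) : Int :=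
  if n = 1 then 1
  else if n < 2 then 0
  else find_land_alt_f n.toNat - 1

-- ===== PRECONDITION & SPEC =====
def Spec_find_land (n : Int) (out : Int) : Prop := out = find_land_alt n
instance (n : Int) (out : Int) : Decidable (Spec_find_land n out) := by unfold Spec_find_land; infer_instance

-- ===== CLAIM (what is proved, stated in full; the proofs are below) =====
def Claim_equal_find_land : Prop := ∀ (n : Int), Dom_find_land n → Spec_find_land n (find_land n)

-- ===== LEMMAS AND PROOFS =====

lemma xor_even_succ (k : Nat) : (2*k) ^^^ (2*k+1) = 1 := by
  have h := Nat.xor_bit false k true k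
  simpa [Nat.bit] using h

lemma xor_odd_succ (k : Nat) : (2*k+1) ^^^ (2*k+2) = 2*(k ^^^ (k+1)) + 1 := by
  have h := Nat.xor_bit true k false (k+1)
  simpa [Nat.bit, Nat.mul_add] using h

lemma fB_def (m : Nat) :
    find_land_alt_f m = if m = 0 then 0 else (m : Int) + 2 * find_land_alt_f (m / 2) := by
  rw [find_land_alt_f]

lemma fB_succ (m : Nat) : find_land_alt_f (m+1) = find_land_alt_f m + ((m ^^^ (m+1) : Nat) : Int) := by
  induction m using Nat.strong_induction_on with
  | _ m ih =>
    rcases Nat.even_or_odd m with he | ho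
    · obtain ⟨k, hk⟩ := he
      have hm : m = 2*k := by omega
      clear hk; subst hm
      rcases Nat.eq_zero_or_pos k with rfl | hkpos
      · simp [find_land_alt_f]
      · rw [fB_def (2*k+1), fB_def (2*k)]
        have h1 : (2*k+1)/2 = k := by omega
        have h2 : (2*k)/2 = k := by omega
        have hx : (2*k) ^^^ (2*k+1) = 1 := xor_even_succ k
        rw [h1, h2, if_neg (by omega), if_neg (by omega), hx]
        push_cast; ring
    · obtain ⟨k, hk⟩ := ho
      subst hk
      have hIH := ih k (by omega)
      rw [show 2*k+1+1 = 2*(k+1) by ring]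
      rw [fB_def (2*(k+1)), fB_def (2*k+1)]
      have h1 : (2*(k+1))/2 = k+1 := by omega
      have h2 : (2*k+1)/2 = k := by omega
      have hx : (2*k+1) ^^^ (2*(k+1)) = 2*(k ^^^ (k+1)) + 1 := by
        rw [show 2*(k+1) = 2*k+2 by ring]; exact xor_odd_succ k
      rw [h1, h2, if_neg (by omega), if_neg (by omega), hx, hIH]
      push_cast; ring

-- the shared sum: sum_{j=1}^{m-1} (j ^ (j+1)) written over List.range
def pvXorSum (m : Nat) : Int :=
  ((List.range (m-1)).map (fun k => (((k+1) ^^^ (k+2) : Nat) : Int))).sum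

lemma fB_eq (m : Nat) (hm : 1 ≤ m) : find_land_alt_f m = 1 + pvXorSum m := by
  induction m with
  | zero => omega
  | succ m ih =>
    rcases Nat.eq_zero_or_pos m with rfl | hmpos
    · simp [find_land_alt_f, pvXorSum]
    · rw [fB_succ, ih hmpos]
      unfold pvXorSum
      rw [show m + 1 - 1 = (m - 1) + 1 by omega, List.range_succ, List.map_append, List.sum_append]
      simp
      rw [show m - 1 + 1 = m by omega, show m - 1 + 2 = m + 1 by omega]
      ring

-- A's value for n ≥ 2 equals pvXorSum n.toNat
lemma find_land_of_ge_two (n : Int) (hn : 2 ≤ n) : find_land n = pvXorSum n.toNat := by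
  rw [find_land, if_neg (by omega)]
  rw [PySem.List.foldl_append_singleton_eq_self]
  simp only [List.nil_append]
  have hlen : ((PySem.List.pyRange 1 (n+1) 1).length : Int) = n := by
    rw [PySem.List.length_pyRange_one]; omega
  rw [hlen]
  -- rewrite the fold body on members of the index range
  have hbody : ∀ (s : Int) (j : Int), j ∈ PySem.List.pyRange 1 n 1 →
      s + PySem.Int.bxor (PySem.List.pyGetD (PySem.List.pyRange 1 (n+1) 1) (j-1) 0)
            (PySem.List.pyGetD (PySem.List.pyRange 1 (n+1) 1) j 0)
        = s + ((j.toNat ^^^ (j.toNat + 1) : Nat) : Int) := by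
    intro s j hj
    rw [PySem.List.mem_pyRange_one] at hj
    have hlen' : (PySem.List.pyRange 1 (n+1) 1).length = n.toNat := by
      rw [PySem.List.length_pyRange_one]; omega
    have e1 : PySem.List.pyGetD (PySem.List.pyRange 1 (n+1) 1) (j-1) 0 = (j : Int) := by
      rw [PySem.List.pyGetD_eq_getElem (PySem.List.pyRange 1 (n+1) 1) 0 (by omega)
            (by rw [hlen']; omega)]
      rw [PySem.List.getElem_pyRange_one]
      omega
    have e2 : PySem.List.pyGetD (PySem.List.pyRange 1 (n+1) 1) j 0 = (j : Int) + 1 := by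
      rw [PySem.List.pyGetD_eq_getElem (PySem.List.pyRange 1 (n+1) 1) 0 (by omega)
            (by rw [hlen']; omega)]
      rw [PySem.List.getElem_pyRange_one]
      omega
    rw [e1, e2, PySem.Int.bxor_of_nonneg (by omega) (by omega),
        show ((j : Int) + 1).toNat = j.toNat + 1 by omega]
  rw [PySem.List.foldl_congr_mem _ _ _ _ hbody, PySem.List.foldl_add]
  simp only [zero_add]
  rw [PySem.List.pyRange_one, List.map_map]
  unfold pvXorSum
  rw [show ((n - 1).toNat) = n.toNat - 1 by omega]
  apply congrArg List.sum
  apply List.map_congr_left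
  intro k _
  simp only [Function.comp]
  rw [show ((1 + (k : Int)).toNat) = k + 1 by omega]

-- ===== VERDICT (by name: the statement is the Claim_ definition above) =====
theorem find_land_spec : Claim_equal_find_land := by
  intro n _
  unfold Spec_find_land
  by_cases h1 : n = 1
  · subst h1; decide
  by_cases h2 : n < 2
  · -- both return 0: A's ranges are empty
    rw [find_land_alt, if_neg h1, if_pos h2, find_land, if_neg h1]
    rw [PySem.List.foldl_append_singleton_eq_self]
    simp only [List.nil_append]
    rw [PySem.List.pyRange_one_eq_nil (show n + 1 ≤ 1 by omega)]
    rw [show (([] : List Int).length : Int) = 0 by simp]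
    rw [PySem.List.pyRange_one_eq_nil (show (0 : Int) ≤ 1 by norm_num)]
    rfl
  · have h2' : 2 ≤ n := by omega
    rw [find_land_alt, if_neg h1, if_neg (by omega),
        fB_eq n.toNat (by omega), find_land_of_ge_two n h2']
    ring
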